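-- pv_equiv track=rewrite | github.com/gortizji/co_features | data/injection.py | generate_zigzag_indices
-- ===== SOURCE A (Python) =====
-- def generate_zigzag_indices(shape):
--     indices = [[] for i in range(shape[0] + shape[1] - 1)]
--     for i in range(shape[0]):
--         for j in range(shape[1]):
--             sum = i + j
--             if sum % 2 == 0:
--
--                 # add at beginning
--                 indices[sum].insert(0, (i, j))
--             else:
--
--                 # add at end of the list
--                 indices[sum].append((i, j))
--     return indices
-- ===== SOURCE B (Python) =====
-- def generate_zigzag_indices(shape):
--     s0, s1 = shape[0], shape[1]
--     if s0 <= 0 or s1 <= 0: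
--         # empty grid: every anti-diagonal slot is empty
--         return [[] for _ in range(s0 + s1 - 1)]
--     out = []
--     for d in range(s0 + s1 - 1):
--         lo = max(0, d - s1 + 1)
--         hi = min(d, s0 - 1)
--         rng = range(hi, lo - 1, -1) if d % 2 == 0 else range(lo, hi + 1)
--         out.append([(i, d - i) for i in rng])
--     return out
-- ===== Notes on version B (the rewrite author's own statement) =====
-- stated objective: faster
-- what changed: A scans every grid cell and grows each anti-diagonal with insert(0)/append (insert at the front costs the diagonal's length); B iterates over the diagonals themselves and emits each one directly in its final order, reversing the index run for even sums.
import Mathlib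
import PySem

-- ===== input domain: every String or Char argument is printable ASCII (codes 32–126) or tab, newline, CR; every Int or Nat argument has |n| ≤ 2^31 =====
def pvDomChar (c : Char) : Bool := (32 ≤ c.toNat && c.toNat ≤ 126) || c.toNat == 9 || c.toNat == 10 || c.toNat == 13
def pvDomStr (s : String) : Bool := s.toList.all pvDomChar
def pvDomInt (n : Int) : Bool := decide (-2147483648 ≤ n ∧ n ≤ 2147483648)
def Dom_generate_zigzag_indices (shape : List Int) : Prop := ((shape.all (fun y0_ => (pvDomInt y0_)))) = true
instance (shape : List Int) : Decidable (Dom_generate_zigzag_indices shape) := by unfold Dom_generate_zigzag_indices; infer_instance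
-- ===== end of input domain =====

-- B builds each anti-diagonal directly in its final order (descending row index for even
-- diagonal sums, ascending otherwise) instead of A's per-cell insert-at-front/append loop.
-- A raises IndexError iff len(shape) < 2; Pre_ excludes exactly those inputs (B raises there too).


-- ===== PORT A =====
-- A-side helpers: the body of A's inner 'for j' loop, and the whole row loop.
def zzInner (i : Int) (ind : List (List (Int × Int))) (j : Int) : List (List (Int × Int)) :=
  let s := i + j
  if PySem.Int.mod s 2 = 0 then
    -- indices[sum].insert(0, (i, j))
    PySem.List.pySetD ind s ((i, j) :: PySem.List.pyGetD ind s [])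
  else
    -- indices[sum].append((i, j))
    PySem.List.pySetD ind s (PySem.List.pyGetD ind s [] ++ [(i, j)])

def zzRow (s1 : Int) (ind : List (List (Int × Int))) (i : Int) : List (List (Int × Int)) :=
  (PySem.List.pyRange 0 s1 1).foldl (zzInner i) ind

def generate_zigzag_indices (shape : List Int) : List (List (Int × Int)) :=
  match PySem.List.pyGet? shape 0, PySem.List.pyGet? shape 1 with
  | some s0, some s1 =>
      (PySem.List.pyRange 0 s0 1).foldl (zzRow s1)
        ((PySem.List.pyRange 0 (s0 + s1 - 1) 1).map (fun _ => ([] : List (Int × Int))))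
  | _, _ => []   -- IndexError in Python: excluded by Pre_

-- ===== PORT B =====
-- B-side helper: one anti-diagonal, built directly in its final order.
def zzDiag (s0 s1 d : Int) : List (Int × Int) :=
  let lo := max 0 (d - s1 + 1)
  let hi := min d (s0 - 1)
  let rng := if PySem.Int.mod d 2 = 0 then PySem.List.pyRange hi (lo - 1) (-1)
             else PySem.List.pyRange lo (hi + 1) 1
  rng.map (fun i => (i, d - i))

def generate_zigzag_indices_alt (shape : List Int) : List (List (Int × Int)) :=
  match PySem.List.pyGet? shape 0 with
  | none => []   -- IndexError in Python: excluded by Pre_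
  | some s0 =>
    match PySem.List.pyGet? shape 1 with
    | none => []   -- IndexError in Python: excluded by Pre_
    | some s1 =>
      if s0 ≤ 0 ∨ s1 ≤ 0 then
        -- empty grid: every anti-diagonal slot is empty
        (PySem.List.pyRange 0 (s0 + s1 - 1) 1).map (fun _ => ([] : List (Int × Int)))
      else (PySem.List.pyRange 0 (s0 + s1 - 1) 1).map (zzDiag s0 s1)

-- ===== PRECONDITION & SPEC =====
-- A raises IndexError iff shape has fewer than two entries; nothing else is excluded.
def Pre_generate_zigzag_indices (shape : List Int) : Prop := 2 ≤ shape.length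
instance (shape : List Int) : Decidable (Pre_generate_zigzag_indices shape) := by
  unfold Pre_generate_zigzag_indices; infer_instance
def pvWitness_generate_zigzag_indices : List Int := [3, 4]

def Spec_generate_zigzag_indices (shape : List Int) (out : List (List (Int × Int))) : Prop := out = generate_zigzag_indices_alt shape
instance (shape : List Int) (out : List (List (Int × Int))) : Decidable (Spec_generate_zigzag_indices shape out) := by unfold Spec_generate_zigzag_indices; infer_instance

-- ===== CLAIM (what is proved, stated in full; the proofs are below) =====
def Claim_equal_generate_zigzag_indices : Prop := ∀ (shape : List Int), Dom_generate_zigzag_indices shape → Pre_generate_zigzag_indices shape → Spec_generate_zigzag_indices shape (generate_zigzag_indices shape)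

-- ===== LEMMAS AND PROOFS =====

-- state of A's fold after the first t steps of row i: row i already added on diagonals d < i + t
def zzMix (s1 i t : Int) (d : Nat) : List (Int × Int) :=
  if i ≤ (d : Int) ∧ (d : Int) < i + t then zzDiag (i + 1) s1 d else zzDiag i s1 d

theorem zzDiag_s0_nonpos (s0 s1 d : Int) (hs0 : s0 ≤ 0) (hd : 0 ≤ d) : zzDiag s0 s1 d = [] := by
  simp only [zzDiag]
  split
  · rw [PySem.List.pyRange_neg_one_eq_nil (by omega)]; rfl
  · rw [PySem.List.pyRange_one_eq_nil (by omega)]; rfl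

theorem zzDiag_s1_nonpos (s0 s1 d : Int) (hs1 : s1 ≤ 0) (hd : 0 ≤ d) : zzDiag s0 s1 d = [] := by
  simp only [zzDiag]
  split
  · rw [PySem.List.pyRange_neg_one_eq_nil (by omega)]; rfl
  · rw [PySem.List.pyRange_one_eq_nil (by omega)]; rfl

-- diagonals not touched by row i are the same before and after the row is added
theorem zzDiag_congr_row (s1 i d : Int) (hi : 0 ≤ i) (_hd : 0 ≤ d) (hs1 : 0 < s1)
    (h : d < i ∨ i + s1 ≤ d) : zzDiag i s1 d = zzDiag (i + 1) s1 d := by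
  rcases h with h | h
  · simp only [zzDiag]
    rw [show min d (i - 1) = min d (i + 1 - 1) from by omega]
  · simp only [zzDiag]
    rw [show min d (i - 1) = i - 1 from by omega, show min d (i + 1 - 1) = i from by omega]
    split
    · rw [PySem.List.pyRange_neg_one_eq_nil (by omega), PySem.List.pyRange_neg_one_eq_nil (by omega)]
    · rw [PySem.List.pyRange_one_eq_nil (by omega), PySem.List.pyRange_one_eq_nil (by omega)]

-- adding (i, t) to diagonal i + t the way A does yields B's diagonal with one more row
theorem zz_cell (s1 i t : Int) (hi : 0 ≤ i) (ht0 : 0 ≤ t) (hts : t < s1) :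
    (if PySem.Int.mod (i + t) 2 = 0 then (i, t) :: zzDiag i s1 (i + t)
     else zzDiag i s1 (i + t) ++ [(i, t)]) = zzDiag (i + 1) s1 (i + t) := by
  simp only [zzDiag]
  rw [show min (i + t) (i - 1) = i - 1 from by omega,
      show min (i + t) (i + 1 - 1) = i from by omega]
  split
  · rw [PySem.List.pyRange_neg_one_cons (show max 0 (i + t - s1 + 1) - 1 < i from by omega)]
    simp only [List.map_cons]
    congr 2
    omega
  · rw [show i - 1 + 1 = i from by ring,
      PySem.List.pyRange_one_succ_right (a := max 0 (i + t - s1 + 1)) (b := i) (by omega)]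
    simp only [List.map_append, List.map_cons, List.map_nil]
    congr 3
    omega

theorem set_map_range {α : Type} (N k : Nat) (v : α) (f g : Nat → α) (_hk : k < N)
    (hfg : ∀ m, m < N → m ≠ k → f m = g m) (hv : g k = v) :
    ((List.range N).map f).set k v = (List.range N).map g := by
  apply List.ext_getElem
  · simp
  · intro n h1 h2
    simp only [List.length_map, List.length_range] at h2
    simp only [List.getElem_set, List.getElem_map, List.getElem_range]
    split
    · next h => rw [← h, hv]
    · next h => exact hfg n h2 (fun he => h he.symm)

-- invariant of A's inner loop: after the first t steps of row i the state is zzMix s1 i t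
theorem zz_inner (s0 s1 i : Int) (hi0 : 0 ≤ i) (his0 : i < s0) (t : Nat) (ht : (t : Int) ≤ s1) :
    (PySem.List.pyRange 0 (t : Int) 1).foldl (zzInner i)
      ((List.range (s0 + s1 - 1).toNat).map (fun d : Nat => zzDiag i s1 (d : Int)))
    = (List.range (s0 + s1 - 1).toNat).map (zzMix s1 i (t : Int)) := by
  induction t with
  | zero =>
    rw [show ((0 : Nat) : Int) = 0 from rfl, PySem.List.pyRange_one_eq_nil le_rfl]
    simp only [List.foldl_nil]
    apply List.map_congr_left
    intro d _
    simp only [zzMix]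
    rw [if_neg (by omega)]
  | succ t ih =>
    have ht' : (t : Int) ≤ s1 := by push_cast at ht ⊢; omega
    have hts : (t : Int) < s1 := by push_cast at ht; omega
    have hcast : (((i + (t : Int)).toNat : Nat) : Int) = i + (t : Int) :=
      Int.toNat_of_nonneg (by omega)
    have hN : (i + (t : Int)).toNat < (s0 + s1 - 1).toNat := by omega
    rw [show ((t + 1 : Nat) : Int) = (t : Int) + 1 from by push_cast; ring,
      PySem.List.pyRange_one_succ_right (by omega), List.foldl_append, ih ht']
    simp only [List.foldl_cons, List.foldl_nil, zzInner]
    have hget : PySem.List.pyGetD ((List.range (s0 + s1 - 1).toNat).map (zzMix s1 i (t : Int)))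
        (i + (t : Int)) [] = zzDiag i s1 (i + (t : Int)) := by
      rw [PySem.List.pyGetD_eq_getElem _ _ (by omega)
        (by simp only [List.length_map, List.length_range]; omega)]
      simp only [List.getElem_map, List.getElem_range, zzMix, hcast]
      rw [if_neg (by omega)]
    have hc := zz_cell s1 i (t : Int) hi0 (by omega) hts
    split
    next h =>
      rw [if_pos h] at hc
      rw [hget, PySem.List.pySetD_of_nonneg _ _ (by omega)]
      apply set_map_range _ _ _ _ _ hN
      · intro m hm hmk
        simp only [zzMix]
        have hne : (m : Int) ≠ i + (t : Int) := by omega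
        split_ifs with h1 h2 h2 <;> first | rfl | (exfalso; omega)
      · simp only [zzMix, hcast]
        rw [if_pos (by omega)]
        exact hc.symm
    next h =>
      rw [if_neg h] at hc
      rw [hget, PySem.List.pySetD_of_nonneg _ _ (by omega)]
      apply set_map_range _ _ _ _ _ hN
      · intro m hm hmk
        simp only [zzMix]
        have hne : (m : Int) ≠ i + (t : Int) := by omega
        split_ifs with h1 h2 h2 <;> first | rfl | (exfalso; omega)
      · simp only [zzMix, hcast]
        rw [if_pos (by omega)]
        exact hc.symm

-- invariant of A's outer loop: after n rows every diagonal is B's diagonal for an n-row grid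
theorem zz_outer (s0 s1 : Int) (n : Nat) (hn : (n : Int) ≤ s0) :
    (PySem.List.pyRange 0 (n : Int) 1).foldl (zzRow s1)
      ((List.range (s0 + s1 - 1).toNat).map (fun d : Nat => zzDiag 0 s1 (d : Int)))
    = (List.range (s0 + s1 - 1).toNat).map (fun d : Nat => zzDiag (n : Int) s1 (d : Int)) := by
  induction n with
  | zero =>
    rw [show ((0 : Nat) : Int) = 0 from rfl, PySem.List.pyRange_one_eq_nil le_rfl]
    simp only [List.foldl_nil]
  | succ n ih =>
    have hn' : (n : Int) ≤ s0 := by push_cast at hn; omega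
    rw [show ((n + 1 : Nat) : Int) = (n : Int) + 1 from by push_cast; ring,
      PySem.List.pyRange_one_succ_right (by omega), List.foldl_append, ih hn']
    simp only [List.foldl_cons, List.foldl_nil, zzRow]
    by_cases hs1 : s1 ≤ 0
    · rw [PySem.List.pyRange_one_eq_nil (by omega)]
      simp only [List.foldl_nil]
      apply List.map_congr_left
      intro d _
      rw [zzDiag_s1_nonpos _ _ _ hs1 (by omega), zzDiag_s1_nonpos _ _ _ hs1 (by omega)]
    · replace hs1 : 0 < s1 := by omega
      have h1 : s1 = ((s1.toNat : Nat) : Int) := (Int.toNat_of_nonneg (by omega)).symm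
      rw [show PySem.List.pyRange 0 s1 1 = PySem.List.pyRange 0 ((s1.toNat : Nat) : Int) 1 from
        by rw [← h1]]
      rw [zz_inner s0 s1 (n : Int) (by omega) (by omega) s1.toNat (by omega)]
      apply List.map_congr_left
      intro d _
      simp only [zzMix, ← h1]
      by_cases hc : ((n : Int) ≤ (d : Int) ∧ (d : Int) < (n : Int) + s1)
      · rw [if_pos hc]
      · rw [if_neg hc]
        exact zzDiag_congr_row s1 (n : Int) (d : Int) (by omega) (by omega) hs1 (by omega)

theorem zz_main (s0 s1 : Int) :
    (PySem.List.pyRange 0 s0 1).foldl (zzRow s1)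
      ((PySem.List.pyRange 0 (s0 + s1 - 1) 1).map (fun _ => ([] : List (Int × Int))))
    = (if s0 ≤ 0 ∨ s1 ≤ 0 then
        (PySem.List.pyRange 0 (s0 + s1 - 1) 1).map (fun _ => ([] : List (Int × Int)))
      else (PySem.List.pyRange 0 (s0 + s1 - 1) 1).map (zzDiag s0 s1)) := by
  by_cases hg : s0 ≤ 0 ∨ s1 ≤ 0
  · rw [if_pos hg]
    rcases hg with hs0 | hs1
    · rw [PySem.List.pyRange_one_eq_nil hs0]
      simp only [List.foldl_nil]
    · have h : ∀ acc x, x ∈ PySem.List.pyRange 0 s0 1 → zzRow s1 acc x = acc := by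
        intro acc x _
        simp only [zzRow, PySem.List.pyRange_one_eq_nil hs1, List.foldl_nil]
      rw [PySem.List.foldl_congr_mem _ _ (fun acc _ => acc) _ h, PySem.List.foldl_ignore]
  · rw [if_neg hg]
    have hs0 : 0 < s0 := by omega
    rw [PySem.List.pyRange_one 0 (s0 + s1 - 1)]
    simp only [List.map_map, Function.comp_def, sub_zero, zero_add]
    rw [show ((List.range (s0 + s1 - 1).toNat).map fun x : Nat => ([] : List (Int × Int)))
          = (List.range (s0 + s1 - 1).toNat).map (fun d : Nat => zzDiag 0 s1 (d : Int)) from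
        List.map_congr_left (fun d _ => (zzDiag_s0_nonpos 0 s1 (d : Int) le_rfl (by omega)).symm)]
    have h0 : s0 = ((s0.toNat : Nat) : Int) := (Int.toNat_of_nonneg (by omega)).symm
    rw [show PySem.List.pyRange 0 s0 1 = PySem.List.pyRange 0 ((s0.toNat : Nat) : Int) 1 from
      by rw [← h0]]
    rw [zz_outer s0 s1 s0.toNat (by omega)]
    exact List.map_congr_left (fun d _ => by rw [← h0])

-- ===== VERDICT (by name: the statement is the Claim_ definition above) =====
theorem generate_zigzag_indices_spec : Claim_equal_generate_zigzag_indices := by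
  intro shape _ hpre
  unfold Spec_generate_zigzag_indices
  rcases shape with _ | ⟨s0, _ | ⟨s1, rest⟩⟩
  · simp [Pre_generate_zigzag_indices] at hpre
  · simp [Pre_generate_zigzag_indices] at hpre
  · have hg0 : PySem.List.pyGet? (s0 :: s1 :: rest) (0 : Int) = some s0 := by simp [pysem]
    have hg1 : PySem.List.pyGet? (s0 :: s1 :: rest) (1 : Int) = some s1 := by simp [pysem]
    unfold generate_zigzag_indices generate_zigzag_indices_alt
    rw [hg0, hg1]
    exact zz_main s0 s1
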